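-- pv_equiv track=rewrite | github.com/dealias/fftwpp | tests/utils.py | nextfftsize
-- ===== SOURCE A (Python) =====
-- def ceilpow2(n):
--   n-=1
--   n |= n >> 1
--   n |= n >> 2
--   n |= n >> 4
--   n |= n >> 8
--   n |= n >> 16
--   n |= n >> 32
--   return n+1
--
-- def ceilquotient(a,b):
--   return -(a//-b)
--
-- def nextfftsize(m):
--   N=ceilpow2(m)
--   if m == N:
--     return N
--   ni=1
--   while ni < N:
--     nj=ni
--     while nj < N:
--       nk=nj
--       while nk < N:
--         N=min(N,nk*ceilpow2(ceilquotient(m,nk)))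
--         nk*=3
--       nj*=5
--     ni*=7
--   return N
-- ===== SOURCE B (Python) =====
-- def ceilpow2(n):
--   n-=1
--   n |= n >> 1
--   n |= n >> 2
--   n |= n >> 4
--   n |= n >> 8
--   n |= n >> 16
--   n |= n >> 32
--   return n+1
--
-- def nextfftsize(m):
--   # Enumerate every 7-smooth number up to the power-of-two bound ceilpow2(m)
--   # (itself 7-smooth and >= m), then pick the least one that is >= m.
--   limit = ceilpow2(m)
--   vals = [1]
--   for p in (2, 3, 5, 7):
--     ext = []
--     for v in vals:
--       q = v * p
--       while q <= limit:
--         ext.append(q)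
--         q *= p
--     vals += ext
--   best = limit
--   for v in vals:
--     if m <= v < best:
--       best = v
--   return best
-- ===== Notes on version B (the rewrite author's own statement) =====
-- stated objective: alternative
-- what changed: A minimizes c*ceilpow2(ceil(m/c)) over triples of 3-5-7 powers with nested pruned while-loops; B instead enumerates all 7-smooth numbers up to the power-of-two bound ceilpow2(m) by staged closure under multiplication by 2,3,5,7 and returns the least enumerated value >= m, with no per-candidate ceilquotient/ceilpow2 completion.
import Mathlib
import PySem

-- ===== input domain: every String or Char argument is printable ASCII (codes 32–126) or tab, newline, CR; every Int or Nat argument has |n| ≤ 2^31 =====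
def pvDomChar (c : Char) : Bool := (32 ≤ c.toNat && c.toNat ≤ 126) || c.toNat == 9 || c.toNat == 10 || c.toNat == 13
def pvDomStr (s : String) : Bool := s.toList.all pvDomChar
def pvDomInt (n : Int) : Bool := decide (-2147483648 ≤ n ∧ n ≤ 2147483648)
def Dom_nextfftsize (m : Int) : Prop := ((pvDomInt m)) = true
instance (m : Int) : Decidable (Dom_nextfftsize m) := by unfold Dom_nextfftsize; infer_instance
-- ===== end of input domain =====

set_option maxRecDepth 4096


-- A minimizes c*ceilpow2(ceil(m/c)) over triples of 3-5-7 powers with nested pruned while-loops;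
-- B instead enumerates every 7-smooth number up to the bound ceilpow2(m) by staged closure under
-- multiplication by 2,3,5,7 and returns the least enumerated value >= m (objective: alternative).

-- ===== PORT A =====
def ceilpow2 (n : Int) : Int :=
  let n1 := n - 1
  let n2 := PySem.Int.bor n1 (n1 >>> (1 : Nat))
  let n3 := PySem.Int.bor n2 (n2 >>> (2 : Nat))
  let n4 := PySem.Int.bor n3 (n3 >>> (4 : Nat))
  let n5 := PySem.Int.bor n4 (n4 >>> (8 : Nat))
  let n6 := PySem.Int.bor n5 (n5 >>> (16 : Nat))
  let n7 := PySem.Int.bor n6 (n6 >>> (32 : Nat))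
  n7 + 1

def ceilquotient (a b : Int) : Int := -(PySem.Int.floordiv a (-b))

-- the three while-loops of A, fuel only makes them total: at every reachable call the
-- fuel N.toNat+1 strictly exceeds the remaining iteration count (proved below)
def loopK (m : Int) : Nat → Int → Int → Int
  | 0, N, _ => N
  | fuel+1, N, nk =>
      if nk < N then loopK m fuel (min N (nk * ceilpow2 (ceilquotient m nk))) (nk * 3) else N

def loopJ (m : Int) : Nat → Int → Int → Int
  | 0, N, _ => N
  | fuel+1, N, nj =>
      if nj < N then loopJ m fuel (loopK m (N.toNat + 1) N nj) (nj * 5) else N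

def loopI (m : Int) : Nat → Int → Int → Int
  | 0, N, _ => N
  | fuel+1, N, ni =>
      if ni < N then loopI m fuel (loopJ m (N.toNat + 1) N ni) (ni * 7) else N

def nextfftsize (m : Int) : Int :=
  let N := ceilpow2 m
  if m = N then N else loopI m (N.toNat + 1) N 1

-- ===== PORT B =====
-- while q <= limit: ext.append(q); q *= p   (fuel only makes the loop total, proved below)
def extendP (p limit : Int) : Nat → Int → List Int → List Int
  | 0, _, acc => acc
  | fuel+1, q, acc => if q ≤ limit then extendP p limit fuel (q * p) (acc ++ [q]) else acc

-- one pass of `for p in …`: ext collected across all v (flatMap), then vals += ext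
def stage (limit p : Int) (vals : List Int) : List Int :=
  vals ++ vals.flatMap (fun v => extendP p limit (limit.toNat + 1) (v * p) [])

def nextfftsize_alt (m : Int) : Int :=
  let limit := ceilpow2 m
  let vals := stage limit 7 (stage limit 5 (stage limit 3 (stage limit 2 [1])))
  vals.foldl (fun best v => if m ≤ v ∧ v < best then v else best) limit

-- ===== PRECONDITION & SPEC =====
def Spec_nextfftsize (m : Int) (out : Int) : Prop := out = nextfftsize_alt m
instance (m : Int) (out : Int) : Decidable (Spec_nextfftsize m out) := by unfold Spec_nextfftsize; infer_instance

-- ===== CLAIM (what is proved, stated in full; the proofs are below) =====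
def Claim_equal_nextfftsize : Prop := ∀ (m : Int), Dom_nextfftsize m → Spec_nextfftsize m (nextfftsize m)

-- ===== LEMMAS AND PROOFS =====

-- bit-level facts about the or-cascade in ceilpow2
lemma testBit_size_pred {x : Nat} (h : x ≠ 0) : x.testBit (x.size - 1) = true := by
  have hs : 0 < x.size := Nat.size_pos.mpr (Nat.pos_of_ne_zero h)
  have h1 : 2 ^ (x.size - 1) ≤ x := Nat.lt_size.mp (by omega)
  have h2 : x < 2 ^ x.size := Nat.lt_size_self x
  have hdiv : x / 2 ^ (x.size - 1) = 1 := by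
    apply Nat.div_eq_of_lt_le (by simpa using h1)
    calc x < 2 ^ x.size := h2
      _ = 2 ^ (x.size - 1) * 2 := by rw [← pow_succ]; congr 1; omega
      _ = (1 + 1) * 2 ^ (x.size - 1) := by ring
  rw [Nat.testBit_eq_decide_div_mod_eq, hdiv]
  decide

lemma orstep_testBit {x : Nat} (y k K : Nat) (hK : k + k = K)
    (h : ∀ i, y.testBit i = true ↔ ∃ d, d < k ∧ x.testBit (i + d) = true) :
    ∀ i, (y ||| y >>> k).testBit i = true ↔
      ∃ d, d < K ∧ x.testBit (i + d) = true := by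
  subst hK
  intro i
  rw [Nat.testBit_or, Nat.testBit_shiftRight, Bool.or_eq_true, h i, h (k + i)]
  constructor
  · rintro (⟨d, hd, hbit⟩ | ⟨d, hd, hbit⟩)
    · exact ⟨d, by omega, hbit⟩
    · exact ⟨k + d, by omega, by rwa [show i + (k + d) = k + i + d by omega]⟩
  · rintro ⟨d, hd, hbit⟩
    by_cases hc : d < k
    · exact Or.inl ⟨d, hc, hbit⟩
    · exact Or.inr ⟨d - k, by omega, by rwa [show k + i + (d - k) = i + d by omega]⟩

lemma smear (x : Nat) (hx : x < 2 ^ 63) :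
    (let y1 := x ||| x >>> 1
     let y2 := y1 ||| y1 >>> 2
     let y3 := y2 ||| y2 >>> 4
     let y4 := y3 ||| y3 >>> 8
     let y5 := y4 ||| y4 >>> 16
     y5 ||| y5 >>> 32) = 2 ^ x.size - 1 := by
  have h0 : ∀ i, x.testBit i = true ↔ ∃ d, d < 1 ∧ x.testBit (i + d) = true := by
    intro i
    constructor
    · intro hb; exact ⟨0, by norm_num, by simpa using hb⟩
    · rintro ⟨d, hd, hb⟩; interval_cases d; simpa using hb
  have h1 := orstep_testBit (x := x) x 1 2 rfl h0
  have h2 := orstep_testBit (x := x) _ 2 4 rfl h1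
  have h3 := orstep_testBit (x := x) _ 4 8 rfl h2
  have h4 := orstep_testBit (x := x) _ 8 16 rfl h3
  have h5 := orstep_testBit (x := x) _ 16 32 rfl h4
  have h6 := orstep_testBit (x := x) _ 32 64 rfl h5
  apply Nat.eq_of_testBit_eq
  intro i
  rw [Nat.testBit_two_pow_sub_one]
  by_cases hi : i < x.size
  · rw [(h6 i).mpr ⟨x.size - 1 - i, by have := Nat.size_le.mpr hx; omega,
      by rw [show i + (x.size - 1 - i) = x.size - 1 by omega]
         exact testBit_size_pred (by intro h; rw [h] at hi; simp [Nat.size_zero] at hi)⟩]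
    simp [hi]
  · simp only [decide_eq_false hi]
    rw [← Bool.not_eq_true]
    intro hb
    obtain ⟨d, hd, hbit⟩ := (h6 _).mp hb
    have : 2 ^ (i + d) ≤ x := by
      by_contra hlt
      rw [Nat.testBit_lt_two_pow (by omega)] at hbit
      exact Bool.false_ne_true hbit
    have := Nat.lt_size.mpr this
    omega

lemma int_bor_shift_natCast (u k : Nat) :
    PySem.Int.bor (u : Int) ((u : Int) >>> k) = ((u ||| u >>> k : Nat) : Int) := by
  rw [show ((u : Int) >>> k) = ((u >>> k : Nat) : Int) from (Int.natCast_shiftRight u k).symm,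
    PySem.Int.bor_natCast]

-- exactness: for 1 ≤ n ≤ 2^32, ceilpow2 n is 2^(bit length of n-1), the least power of 2 ≥ n
lemma ceilpow2_eq {n : Int} (h1 : 1 ≤ n) (h2 : n ≤ 2 ^ 32) :
    ceilpow2 n = (2 : Int) ^ Nat.size (n - 1).toNat := by
  have hx : n - 1 = ((n - 1).toNat : Int) := (Int.toNat_of_nonneg (by omega)).symm
  set x := (n - 1).toNat with hxdef
  have hxlt : x < 2 ^ 63 := by omega
  simp only [ceilpow2]
  rw [hx, int_bor_shift_natCast, int_bor_shift_natCast, int_bor_shift_natCast,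
    int_bor_shift_natCast, int_bor_shift_natCast, int_bor_shift_natCast]
  rw [smear x hxlt]
  have : 1 ≤ 2 ^ x.size := Nat.one_le_two_pow
  push_cast [this]
  ring

lemma ceilpow2_min {n : Int} {k : Nat} (h1 : 1 ≤ n) (h2 : n ≤ 2 ^ 32)
    (h : n ≤ 2 ^ k) : ceilpow2 n ≤ 2 ^ k := by
  rw [ceilpow2_eq h1 h2]
  have hsz : (n - 1).toNat.size ≤ k := Nat.size_le.mpr (by
    have : ((n - 1).toNat : Int) < 2 ^ k := by omega
    exact_mod_cast this)
  exact pow_le_pow_right₀ (by norm_num) hsz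

-- bit-level bounds used where no upper bound on the argument is available
lemma bor_shift_ge {a : Int} (k : Nat) (ha : 0 ≤ a) : a ≤ PySem.Int.bor a (a >>> k) := by
  obtain ⟨x, rfl⟩ := Int.eq_ofNat_of_zero_le ha
  rw [show ((x : Int) >>> k) = ((x >>> k : Nat) : Int) from (Int.natCast_shiftRight x k).symm,
    PySem.Int.bor_natCast]
  exact_mod_cast Nat.left_le_or

lemma bor_shift_nonneg {a : Int} (k : Nat) (ha : 0 ≤ a) : 0 ≤ PySem.Int.bor a (a >>> k) := by
  obtain ⟨x, rfl⟩ := Int.eq_ofNat_of_zero_le ha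
  rw [show ((x : Int) >>> k) = ((x >>> k : Nat) : Int) from (Int.natCast_shiftRight x k).symm,
    PySem.Int.bor_natCast]
  positivity

lemma bor_neg_left {a : Int} (b : Int) (ha : a < 0) : PySem.Int.bor a b < 0 := by
  unfold PySem.Int.bor
  rw [if_neg (by omega)]
  split <;> omega

lemma ceilpow2_ge {m : Int} (h : 1 ≤ m) : m ≤ ceilpow2 m := by
  simp only [ceilpow2]
  have h0 : (0 : Int) ≤ m - 1 := by omega
  have g1 := bor_shift_ge 1 h0; have n1 := bor_shift_nonneg 1 h0
  have g2 := bor_shift_ge 2 n1; have n2 := bor_shift_nonneg 2 n1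
  have g3 := bor_shift_ge 4 n2; have n3 := bor_shift_nonneg 4 n2
  have g4 := bor_shift_ge 8 n3; have n4 := bor_shift_nonneg 8 n3
  have g5 := bor_shift_ge 16 n4; have n5 := bor_shift_nonneg 16 n4
  have g6 := bor_shift_ge 32 n5
  omega

lemma ceilpow2_nonneg {m : Int} (h : 1 ≤ m) : 1 ≤ ceilpow2 m := le_trans h (ceilpow2_ge h)

lemma ceilpow2_nonpos {m : Int} (h : m ≤ 0) : ceilpow2 m ≤ 0 := by
  simp only [ceilpow2]
  have h1 : PySem.Int.bor (m - 1) ((m - 1) >>> (1 : Nat)) < 0 := bor_neg_left _ (by omega)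
  generalize PySem.Int.bor (m - 1) ((m - 1) >>> (1 : Nat)) = a1 at h1 ⊢
  have h2 : PySem.Int.bor a1 (a1 >>> (2 : Nat)) < 0 := bor_neg_left _ h1
  generalize PySem.Int.bor a1 (a1 >>> (2 : Nat)) = a2 at h2 ⊢
  have h3 : PySem.Int.bor a2 (a2 >>> (4 : Nat)) < 0 := bor_neg_left _ h2
  generalize PySem.Int.bor a2 (a2 >>> (4 : Nat)) = a3 at h3 ⊢
  have h4 : PySem.Int.bor a3 (a3 >>> (8 : Nat)) < 0 := bor_neg_left _ h3
  generalize PySem.Int.bor a3 (a3 >>> (8 : Nat)) = a4 at h4 ⊢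
  have h5 : PySem.Int.bor a4 (a4 >>> (16 : Nat)) < 0 := bor_neg_left _ h4
  generalize PySem.Int.bor a4 (a4 >>> (16 : Nat)) = a5 at h5 ⊢
  have h6 : PySem.Int.bor a5 (a5 >>> (32 : Nat)) < 0 := bor_neg_left _ h5
  generalize PySem.Int.bor a5 (a5 >>> (32 : Nat)) = a6 at h6 ⊢
  omega

-- ceiling-division facts
lemma ceilq_le_iff {m c : Int} (hc : 0 < c) (t : Int) :
    ceilquotient m c ≤ t ↔ m ≤ t * c := by
  unfold ceilquotient
  rw [show PySem.Int.floordiv m (-c) = PySem.Int.floordiv (-m) c by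
    rw [show m = -(-m) by ring, PySem.Int.floordiv_neg_neg]; ring_nf]
  rw [neg_le, PySem.Int.le_floordiv_iff_mul_le hc]
  constructor <;> intro h <;> nlinarith

lemma ceilq_ge {m c : Int} (hc : 0 < c) : m ≤ c * ceilquotient m c := by
  have := (ceilq_le_iff hc (ceilquotient m c)).mp le_rfl
  nlinarith

lemma ceilq_pos {m c : Int} (hm : 1 ≤ m) (hc : 1 ≤ c) : 1 ≤ ceilquotient m c := by
  by_contra h
  have h0 : ceilquotient m c ≤ 0 := by omega
  have := (ceilq_le_iff (by omega) 0).mp h0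
  omega

lemma ceilq_le_self {m c : Int} (hm : 1 ≤ m) (hc : 1 ≤ c) : ceilquotient m c ≤ m := by
  rw [ceilq_le_iff (by omega)]
  nlinarith

lemma F_ge {m k : Int} (hm : 1 ≤ m) (hk : 1 ≤ k) : k ≤ k * ceilpow2 (ceilquotient m k) := by
  have hq := ceilq_pos hm hk
  have h2 := ceilpow2_nonneg hq
  nlinarith

-- geometric lists  geom b p c = [p, p*b, …, p*b^(c-1)]
def geom (b : Int) : Int → Nat → List Int
  | _, 0 => []
  | p, c+1 => p :: geom b (p * b) c

lemma geom_mem_le {b : Int} (hb : 1 ≤ b) :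
    ∀ (c : Nat) (p x : Int), 1 ≤ p → x ∈ geom b p c → p ≤ x := by
  intro c
  induction c with
  | zero => intro p x _ hx; simp [geom] at hx
  | succ c ih =>
    intro p x hp hx
    simp only [geom, List.mem_cons] at hx
    rcases hx with rfl | hx
    · exact le_refl x
    · have hpb : 1 ≤ p * b := by nlinarith
      have := ih (p * b) x hpb hx
      nlinarith

lemma geom_mul {b : Int} (a : Int) :
    ∀ (c : Nat) (p : Int), geom b (a * p) c = (geom b p c).map (fun x => a * x) := by
  intro c
  induction c with
  | zero => intro p; simp [geom]
  | succ c ih =>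
    intro p
    simp only [geom, List.map_cons]
    rw [mul_assoc, ih (p * b)]

lemma geom_base {b : Int} (i : Int) (c : Nat) :
    geom b i c = (geom b 1 c).map (fun x => i * x) := by
  have := geom_mul (b := b) i c 1
  simpa using this

lemma geom_eq_range_map (b : Int) :
    ∀ (c : Nat) (p : Int), geom b p c = (List.range c).map (fun t => p * b ^ t) := by
  intro c
  induction c with
  | zero => intro p; simp [geom]
  | succ c ih =>
    intro p
    rw [show geom b p (c + 1) = p :: geom b (p * b) c from rfl, ih (p * b),
      List.range_succ_eq_map, List.map_cons, List.map_map]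
    congr 1
    · ring
    · apply List.map_congr_left
      intro t _
      simp only [Function.comp_apply, pow_succ]
      ring

lemma mem_geom_one_iff {b x : Int} {c : Nat} :
    x ∈ geom b 1 c ↔ ∃ t, t < c ∧ x = b ^ t := by
  rw [geom_eq_range_map, List.mem_map]
  constructor
  · rintro ⟨t, ht, rfl⟩; exact ⟨t, List.mem_range.mp ht, by ring⟩
  · rintro ⟨t, ht, rfl⟩; exact ⟨t, List.mem_range.mpr ht, by ring⟩

-- generic facts about the min-fold  foldl (fun a k => min a (g k)) N l
lemma fmin_le_init (g : Int → Int) :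
    ∀ (l : List Int) (N : Int), List.foldl (fun a k => min a (g k)) N l ≤ N := by
  intro l
  induction l with
  | nil => intro N; simp
  | cons x xs ih =>
    intro N
    simp only [List.foldl_cons]
    exact le_trans (ih (min N (g x))) (min_le_left _ _)

lemma fmin_le_mem (g : Int → Int) :
    ∀ (l : List Int) (N x : Int), x ∈ l → List.foldl (fun a k => min a (g k)) N l ≤ g x := by
  intro l
  induction l with
  | nil => intro N x hx; simp at hx
  | cons y ys ih =>
    intro N x hx
    simp only [List.foldl_cons]
    rcases List.mem_cons.mp hx with rfl | hx
    · exact le_trans (fmin_le_init g ys _) (min_le_right _ _)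
    · exact ih _ x hx

lemma fmin_cases (g : Int → Int) :
    ∀ (l : List Int) (N : Int),
      List.foldl (fun a k => min a (g k)) N l = N ∨
        ∃ x ∈ l, List.foldl (fun a k => min a (g k)) N l = g x := by
  intro l
  induction l with
  | nil => intro N; left; rfl
  | cons y ys ih =>
    intro N
    simp only [List.foldl_cons]
    rcases ih (min N (g y)) with h | ⟨x, hx, h⟩
    · rcases le_total N (g y) with hle | hle
      · left; rw [h, min_eq_left hle]
      · right; exact ⟨y, List.mem_cons_self .., by rw [h, min_eq_right hle]⟩
    · right; exact ⟨x, List.mem_cons_of_mem _ hx, h⟩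

lemma fmin_id (g : Int → Int) :
    ∀ (l : List Int) (N : Int), (∀ x ∈ l, N ≤ g x) →
      List.foldl (fun a k => min a (g k)) N l = N := by
  intro l
  induction l with
  | nil => intro N _; rfl
  | cons y ys ih =>
    intro N h
    simp only [List.foldl_cons]
    rw [min_eq_left (h y (List.mem_cons_self ..))]
    exact ih N (fun x hx => h x (List.mem_cons_of_mem _ hx))

lemma foldl_id_bounded (f : Int → Int → Int) (N : Int) :
    ∀ (l : List Int), (∀ a x, x ∈ l → a ≤ N → f a x = a) →
      ∀ M, M ≤ N → List.foldl f M l = M := by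
  intro l
  induction l with
  | nil => intro _ M _; rfl
  | cons y ys ih =>
    intro h M hM
    simp only [List.foldl_cons]
    rw [h M y (List.mem_cons_self ..) hM]
    exact ih (fun a x hx ha => h a x (List.mem_cons_of_mem _ hx) ha) M hM

lemma foldl_le_init_of_step (f : Int → Int → Int) (hf : ∀ a x, f a x ≤ a) :
    ∀ (l : List Int) (N : Int), List.foldl f N l ≤ N := by
  intro l
  induction l with
  | nil => intro N; simp
  | cons x xs ih => intro N; exact le_trans (ih (f N x)) (hf N x)

-- characterization of A's loops
lemma loopK_eq {m : Int} (hm : 1 ≤ m) :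
    ∀ (fuel : Nat) (N nk : Int) (c : Nat), 1 ≤ nk → (N - nk).toNat < fuel → N ≤ nk * 3 ^ c →
      loopK m fuel N nk =
        List.foldl (fun a k => min a (k * ceilpow2 (ceilquotient m k))) N (geom 3 nk c) := by
  intro fuel
  induction fuel with
  | zero => intro N nk c h1 h2 h3; omega
  | succ f ih =>
    intro N nk c h1 h2 h3
    by_cases hlt : nk < N
    · cases c with
      | zero => simp at h3; omega
      | succ c =>
        rw [show loopK m (f + 1) N nk =
            (if nk < N then
              loopK m f (min N (nk * ceilpow2 (ceilquotient m nk))) (nk * 3) else N) from rfl,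
          if_pos hlt,
          show geom 3 nk (c + 1) = nk :: geom 3 (nk * 3) c from rfl, List.foldl_cons]
        have hle : min N (nk * ceilpow2 (ceilquotient m nk)) ≤ N := min_le_left _ _
        apply ih
        · nlinarith
        · omega
        · rw [pow_succ] at h3
          calc min N (nk * ceilpow2 (ceilquotient m nk)) ≤ N := hle
            _ ≤ nk * (3 ^ c * 3) := h3
            _ = nk * 3 * 3 ^ c := by ring
    · simp only [loopK, if_neg hlt]
      symm
      apply fmin_id
      intro x hx
      have hxk : nk ≤ x := geom_mem_le (by norm_num) c nk x h1 hx
      have hx1 : 1 ≤ x := by omega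
      have := F_ge (k := x) hm hx1
      omega

lemma loopJ_eq {m : Int} (hm : 1 ≤ m) :
    ∀ (fuel : Nat) (N nj : Int) (c : Nat), 1 ≤ nj → (N - nj).toNat < fuel →
      N ≤ nj * 5 ^ c → N ≤ 3 ^ 64 →
      loopJ m fuel N nj =
        List.foldl (fun a j =>
          List.foldl (fun a' k => min a' (k * ceilpow2 (ceilquotient m k))) a (geom 3 j 64))
          N (geom 5 nj c) := by
  intro fuel
  induction fuel with
  | zero => intro N nj c h1 h2 h3 h4; omega
  | succ f ih =>
    intro N nj c h1 h2 h3 h4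
    by_cases hlt : nj < N
    · cases c with
      | zero => simp at h3; omega
      | succ c =>
        rw [show loopJ m (f + 1) N nj =
            (if nj < N then loopJ m f (loopK m (N.toNat + 1) N nj) (nj * 5) else N) from rfl,
          if_pos hlt,
          show geom 5 nj (c + 1) = nj :: geom 5 (nj * 5) c from rfl, List.foldl_cons]
        have hK : loopK m (N.toNat + 1) N nj =
            List.foldl (fun a k => min a (k * ceilpow2 (ceilquotient m k))) N (geom 3 nj 64) := by
          apply loopK_eq hm
          · exact h1
          · omega
          · calc N ≤ 3 ^ 64 := h4
              _ = 1 * 3 ^ 64 := by ring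
              _ ≤ nj * 3 ^ 64 := by
                  apply mul_le_mul_of_nonneg_right h1 (by positivity)
        rw [hK]
        have hle : List.foldl (fun a k => min a (k * ceilpow2 (ceilquotient m k))) N
            (geom 3 nj 64) ≤ N := fmin_le_init _ _ _
        apply ih
        · nlinarith
        · omega
        · rw [pow_succ] at h3
          calc _ ≤ N := hle
            _ ≤ nj * (5 ^ c * 5) := h3
            _ = nj * 5 * 5 ^ c := by ring
        · omega
    · simp only [loopJ, if_neg hlt]
      symm
      apply foldl_id_bounded _ N _ _ N (le_refl N)
      intro a x hx ha
      have hxj : nj ≤ x := geom_mem_le (by norm_num) c nj x h1 hx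
      apply fmin_id
      intro k hk
      have hk1 : x ≤ k := geom_mem_le (by norm_num) 64 x k (by omega) hk
      have := F_ge (k := k) hm (by omega)
      omega

lemma loopI_eq {m : Int} (hm : 1 ≤ m) :
    ∀ (fuel : Nat) (N ni : Int) (c : Nat), 1 ≤ ni → (N - ni).toNat < fuel →
      N ≤ ni * 7 ^ c → N ≤ 3 ^ 64 →
      loopI m fuel N ni =
        List.foldl (fun a i =>
          List.foldl (fun a' j =>
            List.foldl (fun a'' k => min a'' (k * ceilpow2 (ceilquotient m k))) a' (geom 3 j 64))
            a (geom 5 i 64))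
          N (geom 7 ni c) := by
  intro fuel
  induction fuel with
  | zero => intro N ni c h1 h2 h3 h4; omega
  | succ f ih =>
    intro N ni c h1 h2 h3 h4
    by_cases hlt : ni < N
    · cases c with
      | zero => simp at h3; omega
      | succ c =>
        rw [show loopI m (f + 1) N ni =
            (if ni < N then loopI m f (loopJ m (N.toNat + 1) N ni) (ni * 7) else N) from rfl,
          if_pos hlt,
          show geom 7 ni (c + 1) = ni :: geom 7 (ni * 7) c from rfl, List.foldl_cons]
        have h35 : (3 : Int) ^ 64 ≤ 5 ^ 64 := by gcongr; norm_num
        have hJ : loopJ m (N.toNat + 1) N ni =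
            List.foldl (fun a j =>
              List.foldl (fun a' k => min a' (k * ceilpow2 (ceilquotient m k))) a (geom 3 j 64))
              N (geom 5 ni 64) := by
          apply loopJ_eq hm
          · exact h1
          · omega
          · calc N ≤ 3 ^ 64 := h4
              _ ≤ 5 ^ 64 := h35
              _ = 1 * 5 ^ 64 := by ring
              _ ≤ ni * 5 ^ 64 := by
                  apply mul_le_mul_of_nonneg_right h1 (by positivity)
          · exact h4
        rw [hJ]
        have hle : List.foldl (fun a j =>
            List.foldl (fun a' k => min a' (k * ceilpow2 (ceilquotient m k))) a (geom 3 j 64))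
            N (geom 5 ni 64) ≤ N := by
          exact foldl_le_init_of_step _ (fun a x => fmin_le_init _ _ _) _ _
        apply ih
        · nlinarith
        · omega
        · rw [pow_succ] at h3
          calc _ ≤ N := hle
            _ ≤ ni * (7 ^ c * 7) := h3
            _ = ni * 7 * 7 ^ c := by ring
        · omega
    · simp only [loopI, if_neg hlt]
      symm
      apply foldl_id_bounded _ N _ _ N (le_refl N)
      intro a x hx ha
      have hxi : ni ≤ x := geom_mem_le (by norm_num) c ni x h1 hx
      apply foldl_id_bounded _ a _ _ a (le_refl a)
      intro a' y hy ha'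
      have hxy : x ≤ y := geom_mem_le (by norm_num) 64 x y (by omega) hy
      apply fmin_id
      intro k hk
      have hk1 : y ≤ k := geom_mem_le (by norm_num) 64 y k (by omega) hk
      have := F_ge (k := k) hm (by omega)
      omega

-- A's candidate grid
def gA : List Int :=
  ((geom 7 1 64).flatMap (fun i => geom 5 i 64)).flatMap (fun j => geom 3 j 64)

lemma mem_gA {x : Int} :
    x ∈ gA ↔ ∃ i ∈ geom 7 1 64, ∃ j ∈ geom 5 1 64, ∃ k ∈ geom 3 1 64, x = i * j * k := by
  unfold gA
  simp only [List.mem_flatMap]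
  constructor
  · rintro ⟨j', ⟨i, hi, hj'⟩, hx⟩
    rw [geom_base i 64] at hj'
    obtain ⟨j, hj, rfl⟩ := List.mem_map.mp hj'
    rw [geom_base (i * j) 64] at hx
    obtain ⟨k, hk, rfl⟩ := List.mem_map.mp hx
    exact ⟨i, hi, j, hj, k, hk, rfl⟩
  · rintro ⟨i, hi, j, hj, k, hk, rfl⟩
    refine ⟨i * j, ⟨i, hi, ?_⟩, ?_⟩
    · rw [geom_base i 64]; exact List.mem_map.mpr ⟨j, hj, rfl⟩
    · rw [geom_base (i * j) 64]; exact List.mem_map.mpr ⟨k, hk, rfl⟩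

lemma gA_pos {x : Int} (hx : x ∈ gA) : 1 ≤ x := by
  obtain ⟨i, hi, j, hj, k, hk, rfl⟩ := mem_gA.mp hx
  have h1 := geom_mem_le (b := 7) (by norm_num) 64 1 i (le_refl 1) hi
  have h2 := geom_mem_le (b := 5) (by norm_num) 64 1 j (le_refl 1) hj
  have h3 := geom_mem_le (b := 3) (by norm_num) 64 1 k (le_refl 1) hk
  have hij : 1 ≤ i * j := by nlinarith
  nlinarith

-- characterization of B's extendP / stage
lemma extendP_eq {p limit : Int} (hp : 2 ≤ p) :
    ∀ (fuel : Nat) (q : Int) (acc : List Int) (c : Nat), 1 ≤ q → (limit + 1 - q).toNat < fuel →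
      limit < q * p ^ c →
      extendP p limit fuel q acc = acc ++ (geom p q c).filter (fun x => decide (x ≤ limit)) := by
  intro fuel
  induction fuel with
  | zero => intro q acc c h1 h2 h3; omega
  | succ f ih =>
    intro q acc c h1 h2 h3
    by_cases hle : q ≤ limit
    · cases c with
      | zero => simp at h3; omega
      | succ c =>
        rw [show extendP p limit (f + 1) q acc =
            (if q ≤ limit then extendP p limit f (q * p) (acc ++ [q]) else acc) from rfl,
          if_pos hle,
          show geom p q (c + 1) = q :: geom p (q * p) c from rfl, List.filter_cons]
        simp only [decide_eq_true_eq, if_pos hle]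
        have hqp : q + 1 ≤ q * p := by nlinarith
        rw [ih (q * p) (acc ++ [q]) c (by omega) (by omega) (by
          rw [pow_succ] at h3
          calc limit < q * (p ^ c * p) := h3
            _ = q * p * p ^ c := by ring)]
        rw [List.append_assoc]
        rfl
    · simp only [extendP, if_neg hle]
      have : (geom p q c).filter (fun x => decide (x ≤ limit)) = [] := by
        rw [List.filter_eq_nil_iff]
        intro x hx
        have := geom_mem_le (by omega) c q x h1 hx
        simp only [decide_eq_true_eq]
        omega
      rw [this, List.append_nil]

lemma mem_stage_iff {limit p : Int} {P : Int → Prop} (hp : 2 ≤ p) (hlim : limit ≤ 2 ^ 32)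
    (vals : List Int) (hv : ∀ x, x ∈ vals ↔ P x) (hP : ∀ x, P x → 1 ≤ x ∧ x ≤ limit) :
    ∀ x, x ∈ stage limit p vals ↔ ∃ (v : Int) (t : Nat), P v ∧ x = v * p ^ t ∧ x ≤ limit := by
  intro x
  have hext : ∀ v : Int, 1 ≤ v →
      extendP p limit (limit.toNat + 1) (v * p) [] =
        (geom p (v * p) 64).filter (fun y => decide (y ≤ limit)) := by
    intro v hv1
    have hvp : 2 ≤ v * p := by nlinarith
    have hpow : (2 : Int) ^ 64 ≤ p ^ 64 := by gcongr
    rw [extendP_eq hp (limit.toNat + 1) (v * p) [] 64 (by omega) (by omega) (by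
      have h1 : (1 : Int) * p ^ 64 ≤ v * p * p ^ 64 := by
        apply mul_le_mul_of_nonneg_right (by omega) (by positivity)
      have : (2 : Int) ^ 32 < 2 ^ 64 := by norm_num
      nlinarith)]
    rfl
  unfold stage
  rw [List.mem_append, List.mem_flatMap]
  constructor
  · rintro (hx | ⟨v, hvmem, hx⟩)
    · obtain hPx := (hv x).mp hx
      exact ⟨x, 0, hPx, by ring, (hP x hPx).2⟩
    · obtain hPv := (hv v).mp hvmem
      obtain ⟨hv1, _⟩ := hP v hPv
      rw [hext v hv1] at hx
      rw [List.mem_filter] at hx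
      obtain ⟨hxg, hxle⟩ := hx
      rw [geom_eq_range_map, List.mem_map] at hxg
      obtain ⟨t, _, rfl⟩ := hxg
      exact ⟨v, t + 1, hPv, by ring, by simpa using hxle⟩
  · rintro ⟨v, t, hPv, rfl, hle⟩
    obtain ⟨hv1, hvle⟩ := hP v hPv
    cases t with
    | zero =>
      left
      rw [pow_zero, mul_one, hv v]
      exact hPv
    | succ t =>
      right
      refine ⟨v, (hv v).mpr hPv, ?_⟩
      rw [hext v hv1, List.mem_filter]
      constructor
      · rw [geom_eq_range_map, List.mem_map]
        refine ⟨t, List.mem_range.mpr ?_, by ring⟩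
        -- t < 64 because p^t ≤ the value ≤ limit ≤ 2^32
        have hpt : (2 : Int) ^ t ≤ p ^ t := by gcongr
        have hval : (1 : Int) * p ^ t ≤ v * p ^ (t + 1) := by
          rw [pow_succ]
          have : (1 : Int) * p ^ t ≤ (v * p) * p ^ t := by
            apply mul_le_mul_of_nonneg_right (by nlinarith) (by positivity)
          nlinarith
        have h2t : (2 : Int) ^ t ≤ 2 ^ 32 := by nlinarith
        by_contra hge
        have h33 : (2 : Int) ^ 33 ≤ 2 ^ t := by
          apply pow_le_pow_right₀ (by norm_num)
          omega
        have : (2 : Int) ^ 33 ≤ 2 ^ 32 := le_trans h33 h2t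
        norm_num at this
      · simpa using hle

-- facts about B's final selection fold  foldl (fun best v => if m ≤ v ∧ v < best then v else best)
lemma bfold_le_init (m : Int) :
    ∀ (l : List Int) (N : Int),
      List.foldl (fun best v => if m ≤ v ∧ v < best then v else best) N l ≤ N := by
  intro l
  induction l with
  | nil => intro N; simp
  | cons x xs ih =>
    intro N
    simp only [List.foldl_cons]
    refine le_trans (ih _) ?_
    split_ifs with h
    · omega
    · omega

lemma bfold_le_mem (m : Int) :
    ∀ (l : List Int) (N x : Int), x ∈ l → m ≤ x →
      List.foldl (fun best v => if m ≤ v ∧ v < best then v else best) N l ≤ x := by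
  intro l
  induction l with
  | nil => intro N x hx; simp at hx
  | cons y ys ih =>
    intro N x hx hmx
    simp only [List.foldl_cons]
    rcases List.mem_cons.mp hx with rfl | hx
    · refine le_trans (bfold_le_init m ys _) ?_
      split_ifs with h
      · omega
      · omega
    · exact ih _ x hx hmx

lemma bfold_cases (m : Int) :
    ∀ (l : List Int) (N : Int),
      List.foldl (fun best v => if m ≤ v ∧ v < best then v else best) N l = N ∨
        ∃ x ∈ l, m ≤ x ∧
          List.foldl (fun best v => if m ≤ v ∧ v < best then v else best) N l = x := by
  intro l
  induction l with
  | nil => intro N; left; rfl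
  | cons y ys ih =>
    intro N
    simp only [List.foldl_cons]
    by_cases hc : m ≤ y ∧ y < N
    · rw [if_pos hc]
      rcases ih y with h | ⟨x, hx, hmx, h⟩
      · right; exact ⟨y, List.mem_cons_self .., hc.1, h⟩
      · right; exact ⟨x, List.mem_cons_of_mem _ hx, hmx, h⟩
    · rw [if_neg hc]
      rcases ih N with h | ⟨x, hx, hmx, h⟩
      · left; exact h
      · right; exact ⟨x, List.mem_cons_of_mem _ hx, hmx, h⟩

-- ===== VERDICT (by name: the statement is the Claim_ definition above) =====
theorem nextfftsize_spec : Claim_equal_nextfftsize := by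
  intro m hdom
  unfold Spec_nextfftsize nextfftsize nextfftsize_alt
  simp only []
  by_cases hm : 2 ≤ m
  · -- main case: bound and enumeration are exact
    have hdom' : m ≤ 2 ^ 31 := by
      simp only [Dom_nextfftsize, pvDomInt, decide_eq_true_eq] at hdom
      omega
    have hm1 : 1 ≤ m := by omega
    set N0 := ceilpow2 m with hN0
    have hN0ge : m ≤ N0 := ceilpow2_ge hm1
    have hN0le : N0 ≤ 2 ^ 32 := ceilpow2_min hm1 (by omega) (by norm_num; omega)
    -- the enumerated list and its characterization
    have hchar2 : ∀ x, x ∈ stage N0 2 [1] ↔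
        ∃ (a : Nat), x = 2 ^ a ∧ x ≤ N0 := by
      intro x
      rw [mem_stage_iff (P := fun y => y = 1) (by norm_num) hN0le [1] (fun y => by simp)
        (by rintro y rfl; omega)]
      constructor
      · rintro ⟨v, t, rfl, rfl, hle⟩; exact ⟨t, by ring, hle⟩
      · rintro ⟨a, rfl, hle⟩; exact ⟨1, a, rfl, by ring, hle⟩
    have hchar3 : ∀ x, x ∈ stage N0 3 (stage N0 2 [1]) ↔
        ∃ (a b : Nat), x = 2 ^ a * 3 ^ b ∧ x ≤ N0 := by
      intro x
      rw [mem_stage_iff (by norm_num) hN0le _ hchar2 (by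
        rintro y ⟨a, rfl, hle⟩; exact ⟨one_le_pow₀ (by norm_num), hle⟩)]
      constructor
      · rintro ⟨v, t, ⟨a, rfl, _⟩, rfl, hle⟩; exact ⟨a, t, rfl, hle⟩
      · rintro ⟨a, b, rfl, hle⟩
        refine ⟨2 ^ a, b, ⟨a, rfl, ?_⟩, rfl, hle⟩
        have h3 : (1 : Int) ≤ 3 ^ b := one_le_pow₀ (by norm_num)
        have h2 : (0 : Int) < 2 ^ a := by positivity
        nlinarith
    have hchar5 : ∀ x, x ∈ stage N0 5 (stage N0 3 (stage N0 2 [1])) ↔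
        ∃ (a b c : Nat), x = 2 ^ a * 3 ^ b * 5 ^ c ∧ x ≤ N0 := by
      intro x
      rw [mem_stage_iff (by norm_num) hN0le _ hchar3 (by
        rintro y ⟨a, b, rfl, hle⟩
        exact ⟨one_le_mul_of_one_le_of_one_le (one_le_pow₀ (by norm_num))
          (one_le_pow₀ (by norm_num)), hle⟩)]
      constructor
      · rintro ⟨v, t, ⟨a, b, rfl, _⟩, rfl, hle⟩; exact ⟨a, b, t, rfl, hle⟩
      · rintro ⟨a, b, c, rfl, hle⟩
        refine ⟨2 ^ a * 3 ^ b, c, ⟨a, b, rfl, ?_⟩, rfl, hle⟩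
        have h5 : (1 : Int) ≤ 5 ^ c := one_le_pow₀ (by norm_num)
        have h23 : (0 : Int) < 2 ^ a * 3 ^ b := by positivity
        nlinarith
    have hchar7 : ∀ x, x ∈ stage N0 7 (stage N0 5 (stage N0 3 (stage N0 2 [1]))) ↔
        ∃ (a b c d : Nat), x = 2 ^ a * 3 ^ b * 5 ^ c * 7 ^ d ∧ x ≤ N0 := by
      intro x
      rw [mem_stage_iff (by norm_num) hN0le _ hchar5 (by
        rintro y ⟨a, b, c, rfl, hle⟩
        exact ⟨one_le_mul_of_one_le_of_one_le (one_le_mul_of_one_le_of_one_le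
          (one_le_pow₀ (by norm_num)) (one_le_pow₀ (by norm_num)))
          (one_le_pow₀ (by norm_num)), hle⟩)]
      constructor
      · rintro ⟨v, t, ⟨a, b, c, rfl, _⟩, rfl, hle⟩; exact ⟨a, b, c, t, rfl, hle⟩
      · rintro ⟨a, b, c, d, rfl, hle⟩
        refine ⟨2 ^ a * 3 ^ b * 5 ^ c, d, ⟨a, b, c, rfl, ?_⟩, rfl, hle⟩
        have h7 : (1 : Int) ≤ 7 ^ d := one_le_pow₀ (by norm_num)
        have h235 : (0 : Int) < 2 ^ a * 3 ^ b * 5 ^ c := by positivity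
        nlinarith
    set vals := stage N0 7 (stage N0 5 (stage N0 3 (stage N0 2 [1])))
    set rB := vals.foldl (fun best v => if m ≤ v ∧ v < best then v else best) N0 with hrB
    -- membership of exponent products in gA (7-powers × 5-powers × 3-powers)
    have hmemgA : ∀ (b c d : Nat), (3 : Int) ^ b * 5 ^ c * 7 ^ d ≤ 2 ^ 32 →
        7 ^ d * 5 ^ c * 3 ^ b ∈ gA := by
      intro b c d hle
      apply mem_gA.mpr
      have hexp : ∀ (p : Int) (e : Nat), 2 ≤ p → (p : Int) ^ e ≤ 2 ^ 32 → e < 64 := by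
        intro p e hp hpe
        by_contra hge
        have h1 : (2 : Int) ^ e ≤ p ^ e := by gcongr
        have h2 : (2 : Int) ^ 64 ≤ 2 ^ e := by
          apply pow_le_pow_right₀ (by norm_num); omega
        have : (2 : Int) ^ 64 ≤ 2 ^ 32 := by
          calc (2 : Int) ^ 64 ≤ 2 ^ e := h2
            _ ≤ p ^ e := h1
            _ ≤ 2 ^ 32 := hpe
        norm_num at this
      have h3p : (1 : Int) ≤ 3 ^ b := one_le_pow₀ (by norm_num)
      have h5p : (1 : Int) ≤ 5 ^ c := one_le_pow₀ (by norm_num)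
      have h7p : (1 : Int) ≤ 7 ^ d := one_le_pow₀ (by norm_num)
      have e7 : (7 : Int) ^ d ≤ 2 ^ 32 := by
        have t := mul_le_mul_of_nonneg_right (one_le_mul_of_one_le_of_one_le h3p h5p)
          (show (0 : Int) ≤ 7 ^ d by positivity)
        rw [one_mul] at t
        exact le_trans t hle
      have e5 : (5 : Int) ^ c ≤ 2 ^ 32 := by
        have t := mul_le_mul_of_nonneg_right (one_le_mul_of_one_le_of_one_le h3p h7p)
          (show (0 : Int) ≤ 5 ^ c by positivity)
        rw [one_mul] at t
        calc (5 : Int) ^ c ≤ 3 ^ b * 7 ^ d * 5 ^ c := t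
          _ = 3 ^ b * 5 ^ c * 7 ^ d := by ring
          _ ≤ 2 ^ 32 := hle
      have e3 : (3 : Int) ^ b ≤ 2 ^ 32 := by
        have t := mul_le_mul_of_nonneg_right (one_le_mul_of_one_le_of_one_le h5p h7p)
          (show (0 : Int) ≤ 3 ^ b by positivity)
        rw [one_mul] at t
        calc (3 : Int) ^ b ≤ 5 ^ c * 7 ^ d * 3 ^ b := t
          _ = 3 ^ b * 5 ^ c * 7 ^ d := by ring
          _ ≤ 2 ^ 32 := hle
      refine ⟨7 ^ d, mem_geom_one_iff.mpr ⟨d, hexp 7 d (by norm_num) e7, rfl⟩,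
        5 ^ c, mem_geom_one_iff.mpr ⟨c, hexp 5 c (by norm_num) e5, rfl⟩,
        3 ^ b, mem_geom_one_iff.mpr ⟨b, hexp 3 b (by norm_num) e3, rfl⟩, rfl⟩
    -- value of an A-candidate: F c = c * ceilpow2 (ceilquotient m c)
    -- every A-candidate value is an enumerated 7-smooth number ≥ m and ≤ its own fold bound
    by_cases hEq : m = N0
    · -- A returns N0 immediately; B's scan also yields N0
      rw [if_pos hEq]
      apply le_antisymm
      · rcases bfold_cases m vals N0 with h | ⟨x, _, hmx, h⟩
        · omega
        · omega
      · exact bfold_le_init m vals N0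
    · rw [if_neg hEq]
      -- A's loops compute the min-fold over the full grid gA
      have h2332 : (2 : Int) ^ 32 ≤ 3 ^ 64 := by norm_num
      have h364 : N0 ≤ 3 ^ 64 := le_trans hN0le h2332
      have hA : loopI m (N0.toNat + 1) N0 1 =
          List.foldl (fun a k => min a (k * ceilpow2 (ceilquotient m k))) N0 gA := by
        rw [loopI_eq hm1 (N0.toNat + 1) N0 1 64 (le_refl 1) (by omega)
          (by rw [one_mul]; omega) h364]
        rw [← List.foldl_flatMap, ← List.foldl_flatMap]
        rfl
      rw [hA]
      set F := fun k : Int => k * ceilpow2 (ceilquotient m k) with hF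
      apply le_antisymm
      · -- fold over gA ≤ rB
        rcases bfold_cases m vals N0 with h | ⟨x, hxmem, hmx, h⟩
        · rw [hrB, h]; exact fmin_le_init F gA N0
        · rw [hrB, h]
          obtain ⟨a, b, c, d, rfl, hxle⟩ := (hchar7 x).mp hxmem
          set codd := (7 : Int) ^ d * 5 ^ c * 3 ^ b with hcodd
          have h2p : (0 : Int) < 2 ^ a := by positivity
          have h3p : (0 : Int) < 3 ^ b := by positivity
          have h5p : (0 : Int) < 5 ^ c := by positivity
          have h7p : (0 : Int) < 7 ^ d := by positivity
          have hcoddpos : (0 : Int) < codd := by positivity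
          have hcgA : codd ∈ gA := hmemgA b c d (by nlinarith)
          refine le_trans (fmin_le_mem F gA N0 codd hcgA) ?_
          -- F codd ≤ the enumerated value 2^a·3^b·5^c·7^d
          have hq1 : 1 ≤ ceilquotient m codd := ceilq_pos hm1 (by omega)
          have hqle : ceilquotient m codd ≤ 2 ^ a := by
            rw [ceilq_le_iff hcoddpos]
            calc m ≤ 2 ^ a * 3 ^ b * 5 ^ c * 7 ^ d := hmx
              _ = 2 ^ a * codd := by rw [hcodd]; ring
          have hqm : ceilquotient m codd ≤ m := ceilq_le_self hm1 (by omega)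
          have hcp : ceilpow2 (ceilquotient m codd) ≤ 2 ^ a :=
            ceilpow2_min hq1 (by omega) hqle
          calc F codd = codd * ceilpow2 (ceilquotient m codd) := rfl
            _ ≤ codd * 2 ^ a := by
                apply mul_le_mul_of_nonneg_left hcp (by omega)
            _ = 2 ^ a * 3 ^ b * 5 ^ c * 7 ^ d := by rw [hcodd]; ring
      · -- rB ≤ fold over gA
        rcases fmin_cases F gA N0 with h | ⟨x, hx, h⟩
        · rw [h]
          exact bfold_le_init m vals N0
        · rw [h]
          -- F x is an enumerated 7-smooth number ≥ m
          have hx1 : 1 ≤ x := gA_pos hx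
          have hq1 : 1 ≤ ceilquotient m x := ceilq_pos hm1 hx1
          have hqm : ceilquotient m x ≤ m := ceilq_le_self hm1 hx1
          have hcpge : ceilquotient m x ≤ ceilpow2 (ceilquotient m x) := ceilpow2_ge hq1
          have hFge : m ≤ F x := by
            have h1 : m ≤ x * ceilquotient m x := ceilq_ge (by omega)
            have h2 : x * ceilquotient m x ≤ x * ceilpow2 (ceilquotient m x) :=
              mul_le_mul_of_nonneg_left hcpge (by omega)
            exact le_trans h1 h2
          have hFle : F x ≤ N0 := by
            rw [← h]; exact fmin_le_init F gA N0
          -- F x has the 2^a·3^b·5^c·7^d shape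
          obtain ⟨i, hi, j, hj, k, hk, rfl⟩ := mem_gA.mp hx
          obtain ⟨d, _, rfl⟩ := mem_geom_one_iff.mp hi
          obtain ⟨c, _, rfl⟩ := mem_geom_one_iff.mp hj
          obtain ⟨b, _, rfl⟩ := mem_geom_one_iff.mp hk
          have hcpeq : ceilpow2 (ceilquotient m (7 ^ d * 5 ^ c * 3 ^ b)) =
              (2 : Int) ^ Nat.size ((ceilquotient m (7 ^ d * 5 ^ c * 3 ^ b)) - 1).toNat :=
            ceilpow2_eq hq1 (by omega)
          have hmem : F (7 ^ d * 5 ^ c * 3 ^ b) ∈ vals := by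
            apply (hchar7 _).mpr
            refine ⟨Nat.size ((ceilquotient m (7 ^ d * 5 ^ c * 3 ^ b)) - 1).toNat, b, c, d,
              ?_, hFle⟩
            rw [hF]
            simp only []
            rw [hcpeq]
            ring
          exact bfold_le_mem m vals N0 _ hmem hFge
  · -- degenerate inputs m ≤ 1
    by_cases hm1 : m = 1
    · subst hm1; decide
    · have hm0 : m ≤ 0 := by omega
      have hN : ceilpow2 m ≤ 0 := ceilpow2_nonpos hm0
      have ht : (ceilpow2 m).toNat = 0 := Int.toNat_of_nonpos hN
      rw [ht]
      -- A returns N whether or not the guard fires (the loops cannot start)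
      have hA : (if m = ceilpow2 m then ceilpow2 m else loopI m (0 + 1) (ceilpow2 m) 1) =
          ceilpow2 m := by
        split_ifs with h
        · rfl
        · simp only [loopI]
          rw [if_neg (by omega)]
      rw [hA]
      -- B enumerates nothing beyond the seed 1, and the scan keeps the bound
      have hext : ∀ p : Int, 2 ≤ p → extendP p (ceilpow2 m) ((ceilpow2 m).toNat + 1) p [] = [] := by
        intro p hp
        rw [ht]
        simp only [extendP]
        rw [if_neg (by omega)]
      have hstage : ∀ p : Int, 2 ≤ p → stage (ceilpow2 m) p [1] = [1] := by
        intro p hp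
        unfold stage
        rw [ht]
        simp only [List.flatMap_cons, List.flatMap_nil, one_mul]
        rw [show extendP p (ceilpow2 m) (0 + 1) p [] = [] by
          simpa [ht] using hext p hp]
        rfl
      rw [hstage 2 (by norm_num), hstage 3 (by norm_num), hstage 5 (by norm_num),
        hstage 7 (by norm_num)]
      simp only [List.foldl_cons, List.foldl_nil]
      rw [if_neg (by omega)]
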